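-- pv_equiv track=rewrite | github.com/Alexandru-S/Code_Solutions | specialty_arrays/solutions.py | solve
-- ===== SOURCE A (Python) =====
-- import itertools
--
-- def solve(arr):
--     all_combinations = []
--     for x in range(1, len(arr) + 1):
--         for subset in itertools.combinations(arr, x):
--             if len(subset) > 1:
--                 result = None
--                 for y in subset:
--                     if not result:
--                         result = y
--                     else:
--                         result = result | y
--                 all_combinations.append(result)
--     return sum(all_combinations)
-- ===== SOURCE B (Python) =====
-- def solve(arr):
--     # one-pass subset expansion: each new element extends every existing subset OR in O(1)
--     ors = []
--     for x in arr:
--         ors = ors + [o | x for o in ors] + [x]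
--     return sum(ors) - sum(arr)
-- ===== Notes on version B (the rewrite author's own statement) =====
-- stated objective: alternative
-- what changed: Instead of enumerating combinations size-by-size and re-folding the OR of each subset from scratch, B does one pass over the array, extending every previously seen subset-OR with the new element in a single | operation, then subtracts the singletons.
import Mathlib
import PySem

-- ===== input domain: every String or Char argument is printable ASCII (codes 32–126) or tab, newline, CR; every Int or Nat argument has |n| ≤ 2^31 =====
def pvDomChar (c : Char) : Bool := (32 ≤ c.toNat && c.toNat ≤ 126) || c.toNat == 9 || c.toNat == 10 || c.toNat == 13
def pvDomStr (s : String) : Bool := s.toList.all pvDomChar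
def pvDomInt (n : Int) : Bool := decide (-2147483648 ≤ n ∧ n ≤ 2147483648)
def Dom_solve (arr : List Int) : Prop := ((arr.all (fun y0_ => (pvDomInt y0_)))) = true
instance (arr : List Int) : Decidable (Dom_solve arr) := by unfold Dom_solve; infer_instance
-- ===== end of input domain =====

-- B replaces A's size-by-size enumeration of combinations (re-folding the OR of every
-- subset from scratch) by a single pass that extends every previously seen subset-OR
-- with the new element in one | operation; objective: alternative (still exponential
-- in the array length, like A).

-- ===== PORT A =====
-- port of itertools.combinations(arr, k): subsets of size k in itertools' order
def comb : Nat → List Int → List (List Int)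
  | 0, _ => [[]]
  | _ + 1, [] => []
  | k + 1, a :: as => ((comb k as).map (a :: ·)) ++ comb (k + 1) as

-- the inner 'for y in subset' loop; 'if not result' is true for None and for 0
def innerOr (subset : List Int) : Option Int :=
  subset.foldl
    (fun r y =>
      match r with
      | none => some y
      | some v => if v = 0 then some y else some (PySem.Int.bor v y))
    none

def solve (arr : List Int) : Int :=
  ((PySem.List.pyRange 1 ((arr.length : Int) + 1) 1).foldl
      (fun acc x =>
        -- x ∈ {1,…,len arr}, so x.toNat is exact (a count, not an index)
        (comb x.toNat arr).foldl
          (fun acc2 s =>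
            if s.length > 1 then acc2 ++ [(innerOr s).getD 0] else acc2)
          acc)
      []).sum

-- ===== PORT B =====
def solve_alt (arr : List Int) : Int :=
  (arr.foldl (fun ors x => ors ++ ors.map (fun o => PySem.Int.bor o x) ++ [x]) []).sum
    - arr.sum

-- ===== PRECONDITION & SPEC =====
def Spec_solve (arr : List Int) (out : Int) : Prop := out = solve_alt arr
instance (arr : List Int) (out : Int) : Decidable (Spec_solve arr out) := by unfold Spec_solve; infer_instance

-- ===== CLAIM (what is proved, stated in full; the proofs are below) =====
def Claim_equal_solve : Prop := ∀ (arr : List Int), Dom_solve arr → Spec_solve arr (solve arr)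

-- ===== LEMMAS AND PROOFS =====

-- OR of a subset, as Python folds it (0 is the identity of |)
def orf (s : List Int) : Int := s.foldl PySem.Int.bor 0

theorem zero_bor (x : Int) : PySem.Int.bor 0 x = x := by
  rw [PySem.Int.bor_comm]; exact PySem.Int.bor_zero x

theorem orf_append (s : List Int) (x : Int) :
    orf (s ++ [x]) = PySem.Int.bor (orf s) x := by
  simp [orf, List.foldl_append]

theorem innerOr_some (s : List Int) (v : Int) :
    s.foldl
      (fun r y =>
        match r with
        | none => some y
        | some v => if v = 0 then some y else some (PySem.Int.bor v y))
      (some v) = some (s.foldl PySem.Int.bor v) := by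
  induction s generalizing v with
  | nil => rfl
  | cons y s ih =>
      simp only [List.foldl_cons]
      by_cases h : v = 0
      · subst h; rw [show (if (0:Int) = 0 then some y else some (PySem.Int.bor 0 y)) = some (PySem.Int.bor 0 y) by rw [zero_bor]; simp]
        exact ih _
      · rw [if_neg h]; exact ih _

theorem innerOr_eq_orf (s : List Int) (hs : s ≠ []) :
    innerOr s = some (orf s) := by
  cases s with
  | nil => exact absurd rfl hs
  | cons y s =>
      simp only [innerOr, List.foldl_cons]
      rw [innerOr_some]
      simp [orf, zero_bor]

theorem comb_mem_length : ∀ (k : Nat) (l s : List Int), s ∈ comb k l → s.length = k := by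
  intro k
  induction k with
  | zero => intro l s h; simp [comb] at h; simp [h]
  | succ k ih =>
      intro l
      induction l with
      | nil => intro s h; simp [comb] at h
      | cons a as ihl =>
          intro s h
          simp only [comb, List.mem_append, List.mem_map] at h
          rcases h with ⟨t, ht, rfl⟩ | h
          · simp [ih as t ht]
          · exact ihl s h

theorem comb_gt_length : ∀ (l : List Int) (k : Nat), l.length < k → comb k l = [] := by
  intro l
  induction l with
  | nil => intro k hk; cases k with
      | zero => omega
      | succ k => rfl
  | cons a as ih =>
      intro k hk
      cases k with
      | zero => simp at hk
      | succ k =>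
          simp only [comb]
          have h1 : comb k as = [] := ih k (by simp at hk; omega)
          have h2 : comb (k+1) as = [] := ih (k+1) (by simp at hk; omega)
          simp [h1, h2]

theorem comb_one (l : List Int) : comb 1 l = l.map (fun a => [a]) := by
  induction l with
  | nil => rfl
  | cons a as ih => simp [comb, ih]

-- sum of f over combinations of size k
def Sf (k : Nat) (l : List Int) (f : List Int → Int) : Int := ((comb k l).map f).sum

theorem Sf_append : ∀ (l : List Int) (k : Nat) (x : Int) (f : List Int → Int),
    Sf (k + 1) (l ++ [x]) f = Sf (k + 1) l f + Sf k l (fun s => f (s ++ [x])) := by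
  intro l
  induction l with
  | nil =>
      intro k x f
      cases k with
      | zero => simp [Sf, comb]
      | succ k => simp [Sf, comb, comb_gt_length]
  | cons a as ih =>
      intro k x f
      cases k with
      | zero =>
          have h := ih 0 x f
          simp only [Sf, comb, List.cons_append, List.map_cons, List.map_nil,
            List.sum_cons, List.sum_nil, List.nil_append] at h ⊢
          omega
      | succ k =>
          have h1 := ih k x (fun s => f (a :: s))
          have h2 := ih (k + 1) x f
          simp only [Sf, comb, List.cons_append, List.map_append, List.sum_append,
            List.map_map, Function.comp_def] at h1 h2 ⊢
          omega

-- sum of f ∘ orf over all subsets of size ≥ 1 (size j+1 for j < length)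
def Qf (f : Int → Int) (l : List Int) : Int :=
  ((List.range l.length).map (fun j => Sf (j + 1) l (fun s => f (orf s)))).sum

-- the list B's fold builds
def Bors (l : List Int) : List Int :=
  l.foldl (fun ors x => ors ++ ors.map (fun o => PySem.Int.bor o x) ++ [x]) []

theorem Bors_append (l : List Int) (x : Int) :
    Bors (l ++ [x]) = Bors l ++ (Bors l).map (fun o => PySem.Int.bor o x) ++ [x] := by
  simp [Bors, List.foldl_append]

theorem main_lemma : ∀ (l : List Int) (f : Int → Int),
    ((Bors l).map f).sum = Qf f l := by
  intro l
  induction l using List.reverseRecOn with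
  | nil => intro f; simp [Bors, Qf]
  | append_singleton l x ih =>
      intro f
      rw [Bors_append]
      simp only [List.map_append, List.sum_append, List.map_map, List.map_cons,
        List.map_nil, List.sum_cons, List.sum_nil]
      rw [show (f ∘ fun o => PySem.Int.bor o x) = (fun o => f (PySem.Int.bor o x)) from rfl]
      rw [ih f, ih (fun o => f (PySem.Int.bor o x))]
      -- right-hand side
      simp only [Qf, List.length_append, List.length_cons, List.length_nil]
      have hsplit : ∀ j, Sf (j + 1) (l ++ [x]) (fun s => f (orf s))
          = Sf (j + 1) l (fun s => f (orf s)) + Sf j l (fun s => f (PySem.Int.bor (orf s) x)) := by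
        intro j
        rw [Sf_append]
        congr 1
        apply congrArg
        funext s
        rw [orf_append]
      simp only [hsplit]
      rw [PySem.List.sum_map_add_int]
      have hA : ((List.range (l.length + 1 + 0)).map (fun j => Sf (j + 1) l (fun s => f (orf s)))).sum
          = ((List.range l.length).map (fun j => Sf (j + 1) l (fun s => f (orf s)))).sum := by
        simp only [Nat.add_zero, List.range_succ, List.map_append, List.sum_append,
          List.map_cons, List.map_nil, List.sum_cons, List.sum_nil]
        have : Sf (l.length + 1) l (fun s => f (orf s)) = 0 := by
          simp [Sf, comb_gt_length l (l.length + 1) (by omega)]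
        omega
      have hB : ((List.range (l.length + 1 + 0)).map (fun j => Sf j l (fun s => f (PySem.Int.bor (orf s) x)))).sum
          = f x + ((List.range l.length).map (fun j => Sf (j + 1) l (fun s => f (PySem.Int.bor (orf s) x)))).sum := by
        simp only [Nat.add_zero, List.range_succ_eq_map, List.map_cons, List.sum_cons, List.map_map]
        have h0 : Sf 0 l (fun s => f (PySem.Int.bor (orf s) x)) = f x := by
          simp [Sf, comb, orf, zero_bor]
        rw [h0]
        rfl
      rw [hA, hB]
      ring

theorem sum_flatMap_eq (L : List Int) (g : Int → List Int) :
    (L.flatMap g).sum = (L.map (fun x => (g x).sum)).sum := by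
  induction L with
  | nil => rfl
  | cons y L ih => simp [List.flatMap_cons, ih]

-- A's result, reshaped into the flatMap-of-filters form
theorem solve_eq_flat (arr : List Int) :
    solve arr
      = (((List.range arr.length).map (fun j =>
            (((comb (j + 1) arr).filter (fun s => s.length > 1)).map
              (fun s => (innerOr s).getD 0)).sum)).sum) := by
  unfold solve
  rw [PySem.List.pyRange_one]
  have hlen : (((arr.length : Int) + 1) - 1).toNat = arr.length := by omega
  rw [hlen]
  have hfold : ∀ (L : List Int) (init : List Int),
      L.foldl (fun acc x => (comb x.toNat arr).foldl
          (fun acc2 s => if s.length > 1 then acc2 ++ [(innerOr s).getD 0] else acc2) acc) init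
        = init ++ L.flatMap (fun x => ((comb x.toNat arr).filter
            (fun s => s.length > 1)).map (fun s => (innerOr s).getD 0)) := by
    intro L
    induction L with
    | nil => intro init; simp
    | cons y L ihL =>
        intro init
        rw [List.foldl_cons, PySem.List.foldl_append_ite, ihL]
        simp
  rw [hfold]
  rw [List.nil_append, sum_flatMap_eq]
  apply congrArg
  rw [List.map_map]
  apply List.map_congr_left
  intro j hj
  have h1j : ((1 : Int) + (j : Nat)).toNat = j + 1 := by omega
  simp only [Function.comp_def, h1j]

theorem filter_comb_succ (arr : List Int) (j : Nat) :
    ((comb (j + 2) arr).filter (fun s => s.length > 1)) = comb (j + 2) arr := by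
  apply List.filter_eq_self.2
  intro s hs
  have := comb_mem_length (j + 2) arr s hs
  simp [this]

theorem map_innerOr_comb (arr : List Int) (k : Nat) :
    (comb (k + 1) arr).map (fun s => (innerOr s).getD 0)
      = (comb (k + 1) arr).map (fun s => orf s) := by
  apply List.map_congr_left
  intro s hs
  have hl := comb_mem_length (k + 1) arr s hs
  have hne : s ≠ [] := by intro h; rw [h] at hl; simp at hl
  rw [innerOr_eq_orf s hne]
  rfl

theorem Sf_one (arr : List Int) : Sf 1 arr (fun s => orf s) = arr.sum := by
  simp [Sf, comb_one, List.map_map, Function.comp_def, orf, zero_bor]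

theorem solve_eq_Q_sub (arr : List Int) : solve arr = Qf (fun v => v) arr - arr.sum := by
  rw [solve_eq_flat]
  cases harr : arr.length with
  | zero =>
      have : arr = [] := List.length_eq_zero_iff.mp harr
      subst this
      simp [Qf]
  | succ n =>
      rw [List.range_succ_eq_map]
      simp only [List.map_cons, List.sum_cons, List.map_map]
      have h0 : (((comb 1 arr).filter (fun s => s.length > 1)).map
          (fun s => (innerOr s).getD 0)).sum = 0 := by
        have : (comb 1 arr).filter (fun s => s.length > 1) = [] := by
          apply List.filter_eq_nil_iff.2
          intro s hs
          have := comb_mem_length 1 arr s hs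
          simp [this]
        simp [this]
      rw [h0]
      have hQ : Qf (fun v => v) arr = Sf 1 arr (fun s => orf s)
          + ((List.range n).map (fun j => Sf (j + 2) arr (fun s => orf s))).sum := by
        simp only [Qf, harr, List.range_succ_eq_map, List.map_cons, List.sum_cons,
          List.map_map]
        rfl
      rw [hQ, Sf_one]
      have hcong : ∀ j, ((((comb (j + 1 + 1) arr).filter (fun s => s.length > 1)).map
            (fun s => (innerOr s).getD 0)).sum) = Sf (j + 2) arr (fun s => orf s) := by
        intro j
        rw [filter_comb_succ, Sf]
        rw [map_innerOr_comb arr (j + 1)]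
      simp only [Function.comp_def, Nat.succ_eq_add_one]
      rw [List.map_congr_left (fun j _ => hcong j)]
      ring

-- ===== VERDICT (by name: the statement is the Claim_ definition above) =====
theorem solve_spec : Claim_equal_solve := by
  intro arr _
  unfold Spec_solve solve_alt
  rw [solve_eq_Q_sub]
  have h := main_lemma arr (fun v => v)
  simp only [List.map_id'] at h
  rw [← h]
  rfl
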